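-- pv_equiv track=rewrite | github.com/zslalala/DataMiningHomeWork | HomeWork2/RelatedFunction.py | GenerateSubItem
-- ===== SOURCE A (Python) =====
-- def GenerateSubItem(item=[]):
--     s = 1;
--     total_sub_item = [];
--     while s < (1 << len(item)) - 1:
--         sub_item = [];
--         for i in range(len(item)):
--             if s & (1 << i):
--                 sub_item.append(item[i])
--         total_sub_item.append(sub_item)
--         s += 1
--     return total_sub_item;
-- ===== SOURCE B (Python) =====
-- def GenerateSubItem(item=[]):
--     # Doubling powerset: subsets appear in bitmask-ascending order; strip empty (first) and full (last).
--     result = [[]]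
--     for x in item:
--         result += [r + [x] for r in result]
--     return result[1:-1]
-- ===== Notes on version B (the rewrite author's own statement) =====
-- stated objective: alternative
-- what changed: Replaces A's per-mask while loop (which rebuilds each subset by scanning all n bits of every s in 1..2^n-2) with the iterative doubling construction of the full powerset (result += [r+[x] for r in result]) followed by a [1:-1] slice dropping the empty and full subsets.
import Mathlib
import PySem

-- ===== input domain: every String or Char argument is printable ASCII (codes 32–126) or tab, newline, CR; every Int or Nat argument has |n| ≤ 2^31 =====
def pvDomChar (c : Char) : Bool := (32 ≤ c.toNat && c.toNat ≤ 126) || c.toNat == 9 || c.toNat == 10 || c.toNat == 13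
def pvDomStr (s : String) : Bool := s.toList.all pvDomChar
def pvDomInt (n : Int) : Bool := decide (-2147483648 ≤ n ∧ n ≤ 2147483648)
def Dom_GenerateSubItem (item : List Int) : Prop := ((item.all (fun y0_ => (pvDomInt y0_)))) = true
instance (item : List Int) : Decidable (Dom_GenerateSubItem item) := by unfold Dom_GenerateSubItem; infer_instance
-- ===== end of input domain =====

-- B replaces A's bitmask-ascending while loop with the iterative doubling powerset
-- (result += [r+[x] for r in result]) followed by a [1:-1] slice; objective: alternative decomposition.


-- ===== PORT A =====
-- inner 'for i in range(len(item)): if s & (1 << i): sub_item.append(item[i])'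
-- (item[i] with i drawn from range(len(item)) is always in range, so List.getD is exact)
def pvSubA (item : List Int) (s : Nat) : List Int :=
  (List.range item.length).foldl
    (fun sub i => if s &&& (1 <<< i) != 0 then sub ++ [item.getD i 0] else sub) []

-- the 'while s < (1 << len(item)) - 1' loop, consing each sub_item in order
def pvLoopA (item : List Int) (limit s : Nat) : List (List Int) :=
  if s < limit then pvSubA item s :: pvLoopA item limit (s + 1) else []
termination_by limit - s

def GenerateSubItem (item : List Int) : List (List Int) :=
  pvLoopA item ((1 <<< item.length) - 1) 1

-- ===== PORT B =====
def GenerateSubItem_alt (item : List Int) : List (List Int) :=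
  let result := item.foldl (fun res x => res ++ res.map (fun r => r ++ [x])) [[]]
  PySem.List.slice result (some 1) (some (-1))

-- ===== PRECONDITION & SPEC =====
def Spec_GenerateSubItem (item : List Int) (out : List (List Int)) : Prop := out = GenerateSubItem_alt item
instance (item : List Int) (out : List (List Int)) : Decidable (Spec_GenerateSubItem item out) := by unfold Spec_GenerateSubItem; infer_instance

-- ===== CLAIM (what is proved, stated in full; the proofs are below) =====
def Claim_equal_GenerateSubItem : Prop := ∀ (item : List Int), Dom_GenerateSubItem item → Spec_GenerateSubItem item (GenerateSubItem item)

-- ===== LEMMAS AND PROOFS =====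

-- the subset selected by bitmask s, reading low bits first (= item elements in order)
def pvBits (item : List Int) (s : Nat) : List Int :=
  match item with
  | [] => []
  | a :: l => (if s % 2 = 1 then [a] else []) ++ pvBits l (s / 2)

lemma pvTest_zero (s : Nat) : (s &&& (1 <<< 0) != 0) = decide (s % 2 = 1) := by
  show (s &&& 1 != 0) = decide (s % 2 = 1)
  rw [Nat.and_one_is_mod]
  rcases Nat.mod_two_eq_zero_or_one s with h | h <;> simp [h]

lemma pvTest_succ (s i : Nat) : (s &&& (1 <<< (i + 1)) != 0) = (s / 2 &&& (1 <<< i) != 0) := by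
  have h : ∀ (t j : Nat), (t &&& (1 <<< j) != 0) = t.testBit j := by
    intro t j
    simp [Nat.one_shiftLeft, Nat.and_two_pow]
    cases ht : t.testBit j
    · simp
    · simp
  rw [h, h, Nat.testBit_add_one]

lemma pvSubA_closed (item : List Int) (s : Nat) :
    pvSubA item s
      = ((List.range item.length).filter (fun i => s &&& (1 <<< i) != 0)).map
          (fun i => item.getD i 0) := by
  have h := PySem.List.foldl_append_if (fun i => s &&& (1 <<< i) != 0)
    (fun i => item.getD i 0) (List.range item.length) ([] : List Int)
  exact h.trans (by simp)

lemma pvMask_eq_bits :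
    ∀ (l : List Int) (s : Nat),
      ((List.range l.length).filter (fun i => s &&& (1 <<< i) != 0)).map (fun i => l.getD i 0)
        = pvBits l s := by
  intro l
  induction l with
  | nil => intro s; rfl
  | cons a l ih =>
    intro s
    rw [List.length_cons, List.range_succ_eq_map, List.filter_cons]
    simp only [pvTest_zero, List.filter_map, Function.comp_def, Nat.succ_eq_add_one, pvTest_succ]
    have hc : ((fun i => (a :: l).getD i 0) ∘ Nat.succ) = (fun i : Nat => l.getD i 0) := rfl
    by_cases h : s % 2 = 1
    · rw [if_pos (by simp [h]), List.map_cons, List.map_map, hc, ih]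
      simp [pvBits, h]
    · rw [if_neg (by simp [h]), List.map_map, hc, ih]
      simp [pvBits, h]

lemma pvSubA_eq_bits (item : List Int) (s : Nat) : pvSubA item s = pvBits item s :=
  (pvSubA_closed item s).trans (pvMask_eq_bits item s)

lemma pvLoopA_eq (item : List Int) (limit : Nat) :
    ∀ (n s : Nat), limit - s = n → pvLoopA item limit s = (List.range' s n).map (pvBits item) := by
  intro n
  induction n with
  | zero =>
    intro s h
    rw [pvLoopA, if_neg (by omega)]
    simp
  | succ n ih =>
    intro s h
    rw [pvLoopA, if_pos (by omega), List.range'_succ, List.map_cons, pvSubA_eq_bits,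
      ih (s + 1) (by omega)]

lemma pvBits_append_low (ys : List Int) (x : Int) :
    ∀ s : Nat, s < 2 ^ ys.length → pvBits (ys ++ [x]) s = pvBits ys s := by
  induction ys with
  | nil =>
    intro s hs
    simp only [List.length_nil, pow_zero] at hs
    have h0 : s = 0 := by omega
    subst h0
    rfl
  | cons a l ih =>
    intro s hs
    show (if s % 2 = 1 then [a] else []) ++ pvBits (l ++ [x]) (s / 2)
       = (if s % 2 = 1 then [a] else []) ++ pvBits l (s / 2)
    rw [ih (s / 2) (by
      have : 2 ^ (a :: l).length = 2 * 2 ^ l.length := by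
        rw [List.length_cons, pow_succ]; ring
      omega)]

lemma pvBits_append_high (ys : List Int) (x : Int) :
    ∀ s : Nat, s < 2 ^ ys.length → pvBits (ys ++ [x]) (2 ^ ys.length + s) = pvBits ys s ++ [x] := by
  induction ys with
  | nil =>
    intro s hs
    simp only [List.length_nil, pow_zero] at hs
    have h0 : s = 0 := by omega
    subst h0
    rfl
  | cons a l ih =>
    intro s hs
    have hp : 2 ^ (a :: l).length = 2 * 2 ^ l.length := by
      rw [List.length_cons, pow_succ]; ring
    show (if (2 ^ (a :: l).length + s) % 2 = 1 then [a] else [])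
          ++ pvBits (l ++ [x]) ((2 ^ (a :: l).length + s) / 2)
       = ((if s % 2 = 1 then [a] else []) ++ pvBits l (s / 2)) ++ [x]
    have hm : (2 ^ (a :: l).length + s) % 2 = s % 2 := by omega
    have hd : (2 ^ (a :: l).length + s) / 2 = 2 ^ l.length + s / 2 := by omega
    rw [hm, hd, ih (s / 2) (by omega), List.append_assoc]

lemma pvDouble_eq (item : List Int) :
    item.foldl (fun res x => res ++ res.map (fun r => r ++ [x])) [[]]
      = (List.range (2 ^ item.length)).map (pvBits item) := by
  induction item using List.reverseRecOn with
  | nil => rfl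
  | append_singleton ys x ih =>
    rw [List.foldl_append, ih]
    have hlen : (ys ++ [x]).length = ys.length + 1 := by simp
    rw [hlen, pow_succ, show 2 ^ ys.length * 2 = 2 ^ ys.length + 2 ^ ys.length by ring,
      List.range_add]
    simp only [List.foldl_cons, List.foldl_nil, List.map_append, List.map_map]
    congr 1
    · exact (List.map_congr_left fun s hs =>
        pvBits_append_low ys x s (List.mem_range.mp hs)).symm
    · refine (List.map_congr_left fun s hs => ?_).symm
      simpa using pvBits_append_high ys x s (List.mem_range.mp hs)

lemma pvTakeRange' (a m n : Nat) : (List.range' a n).take m = List.range' a (min m n) := by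
  induction n generalizing a m with
  | zero => simp
  | succ n ih =>
    cases m with
    | zero => simp
    | succ m => simp [List.range'_succ, ih, Nat.succ_min_succ]

-- ===== VERDICT (by name: the statement is the Claim_ definition above) =====
theorem GenerateSubItem_spec : Claim_equal_GenerateSubItem := by
  intro item _
  show GenerateSubItem item = GenerateSubItem_alt item
  have hpos : 1 ≤ 2 ^ item.length := Nat.one_le_two_pow
  have hc1 : PySem.List.clampIdx (2 ^ item.length) 1 = 1 := by
    unfold PySem.List.clampIdx
    rw [if_neg (by omega)]
    omega
  have hc2 : PySem.List.clampIdx (2 ^ item.length) (-1) = 2 ^ item.length - 1 := by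
    unfold PySem.List.clampIdx
    rw [if_pos (by omega), if_neg (by omega)]
    omega
  unfold GenerateSubItem GenerateSubItem_alt
  rw [Nat.one_shiftLeft, pvLoopA_eq item (2 ^ item.length - 1) ((2 ^ item.length - 1) - 1) 1 rfl,
    pvDouble_eq]
  unfold PySem.List.slice
  simp only [List.length_map, List.length_range]
  rw [hc1, hc2, ← List.map_drop, ← List.map_take]
  rw [show List.drop 1 (List.range (2 ^ item.length)) = List.range' 1 (2 ^ item.length - 1) by
    simp [List.range_eq_range']]
  have hmin : min (2 ^ item.length - 1 - 1) (2 ^ item.length - 1) = 2 ^ item.length - 1 - 1 := by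
    omega
  rw [pvTakeRange', hmin]
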